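-- pv_equiv track=rewrite | github.com/Alex-Holborn/decipheringCP3404 | Decipher.py | create_char_dictionary
-- ===== SOURCE A (Python) =====
-- def create_char_dictionary(input, allow_spaces, alphabet):
--     char_dict = {}
--     for char in input:
--         if char in alphabet:
--             if (allow_spaces and char == " ") or char != " ":
--                 if char in char_dict.keys():
--                     char_dict[char] += 1
--                 else:
--                     char_dict[char] = 1
--     return char_dict
-- ===== SOURCE B (Python) =====
-- def create_char_dictionary(input, allow_spaces, alphabet):
--     chars = list(input)
--     if not chars:
--         return {}
--     c = chars[0]
--     rest = [x for x in chars if x != c]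
--     d = create_char_dictionary(rest, allow_spaces, alphabet)
--     if c in alphabet and (allow_spaces or c != " "):
--         out = {c: len(chars) - len(rest)}
--         out.update(d)
--         return out
--     return d
-- ===== Notes on version B (the rewrite author's own statement) =====
-- stated objective: alternative
-- what changed: Replaces A's single left-to-right accumulating dict pass by a recursive removal-based grouping: take the first character, compute its count as the length drop after removing all its occurrences, and recurse on the remainder (which contains no copy of it).
import Mathlib
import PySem

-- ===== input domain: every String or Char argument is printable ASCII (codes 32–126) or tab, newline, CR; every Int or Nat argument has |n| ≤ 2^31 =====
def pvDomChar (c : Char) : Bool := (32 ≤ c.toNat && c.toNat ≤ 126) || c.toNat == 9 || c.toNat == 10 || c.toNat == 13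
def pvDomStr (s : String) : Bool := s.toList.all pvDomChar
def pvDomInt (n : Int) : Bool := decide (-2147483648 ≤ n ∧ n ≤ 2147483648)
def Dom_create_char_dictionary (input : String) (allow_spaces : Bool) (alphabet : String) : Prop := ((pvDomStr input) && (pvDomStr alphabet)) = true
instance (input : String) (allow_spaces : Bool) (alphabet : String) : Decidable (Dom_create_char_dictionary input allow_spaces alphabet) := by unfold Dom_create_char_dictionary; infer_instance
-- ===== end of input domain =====

-- B replaces A's single accumulating pass by a recursive removal-based grouping: take the first
-- character, count it by removing all its occurrences, recurse on the remainder ('alternative').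

-- ===== PORT A =====
def create_char_dictionary (input : String) (allow_spaces : Bool) (alphabet : String) : List (String × Int) :=
  (input.toList.foldl (fun d char =>
    if PySem.Str.isIn (String.singleton char) alphabet then
      if (allow_spaces && char == ' ') || char != ' ' then
        if d.contains (String.singleton char) then
          d.insert (String.singleton char) (d.getD (String.singleton char) 0 + 1)
        else
          d.insert (String.singleton char) 1
      else d
    else d) PySem.Dict.empty).items

-- ===== PORT B =====
-- the recursion of Source B: first char c, rest = all chars ≠ c, count of c = length difference
def pvGoB (allow_spaces : Bool) (alphabet : String) : List Char → PySem.Dict String Int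
  | [] => PySem.Dict.empty
  | c :: t =>
    let rest := (c :: t).filter (fun x => x != c)
    let d := pvGoB allow_spaces alphabet rest
    if PySem.Str.isIn (String.singleton c) alphabet && (allow_spaces || c != ' ') then
      (PySem.Dict.empty.insert (String.singleton c)
        (((c :: t).length : Int) - (rest.length : Int))).update d.items
    else d
termination_by l => l.length
decreasing_by
  simp only [List.filter_cons, bne_self_eq_false, List.length_cons, Bool.false_eq_true,
    ↓reduceIte]
  exact Nat.lt_succ_of_le (List.length_filter_le _ _)

def create_char_dictionary_alt (input : String) (allow_spaces : Bool) (alphabet : String) : List (String × Int) :=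
  (pvGoB allow_spaces alphabet input.toList).items

-- ===== PRECONDITION & SPEC =====
def Spec_create_char_dictionary (input : String) (allow_spaces : Bool) (alphabet : String) (out : List (String × Int)) : Prop := out = create_char_dictionary_alt input allow_spaces alphabet
instance (input : String) (allow_spaces : Bool) (alphabet : String) (out : List (String × Int)) : Decidable (Spec_create_char_dictionary input allow_spaces alphabet out) := by unfold Spec_create_char_dictionary; infer_instance

-- ===== CLAIM (what is proved, stated in full; the proofs are below) =====
def Claim_equal_create_char_dictionary : Prop := ∀ (input : String) (allow_spaces : Bool) (alphabet : String), Dom_create_char_dictionary input allow_spaces alphabet → Spec_create_char_dictionary input allow_spaces alphabet (create_char_dictionary input allow_spaces alphabet)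

-- ===== LEMMAS AND PROOFS =====

theorem pv_sing_inj : Function.Injective String.singleton := by
  intro a b h
  have h2 : (String.singleton a).toList = (String.singleton b).toList := by rw [h]
  simpa using h2

-- the admissibility predicate both programs apply to a character
def pvQ (allow_spaces : Bool) (alphabet : String) (c : Char) : Bool :=
  PySem.Str.isIn (String.singleton c) alphabet && (allow_spaces || c != ' ')

-- A's guarded fold body, with the two dict branches merged and the space test simplified.
theorem pv_bodyA (allow_spaces : Bool) (alphabet : String)
    (d : PySem.Dict String Int) (c : Char) :
    (if PySem.Str.isIn (String.singleton c) alphabet then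
      if (allow_spaces && c == ' ') || c != ' ' then
        if d.contains (String.singleton c) then
          d.insert (String.singleton c) (d.getD (String.singleton c) 0 + 1)
        else d.insert (String.singleton c) 1
      else d
    else d)
    = (if pvQ allow_spaces alphabet c then
        d.insert (String.singleton c) (d.getD (String.singleton c) 0 + 1)
      else d) := by
  have hmerge : (if d.contains (String.singleton c) then
        d.insert (String.singleton c) (d.getD (String.singleton c) 0 + 1)
      else d.insert (String.singleton c) 1)
      = d.insert (String.singleton c) (d.getD (String.singleton c) 0 + 1) := by
    by_cases h : d.contains (String.singleton c) = true
    · simp [h]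
    · have h' : d.contains (String.singleton c) = false := by simpa using h
      simp [h', PySem.Dict.getD_of_not_contains _ _ h']
  have hsp : ((allow_spaces && c == ' ') || c != ' ') = (allow_spaces || c != ' ') := by
    by_cases hc : c = ' ' <;> cases allow_spaces <;> simp [hc]
  cases hin : PySem.Str.isIn (String.singleton c) alphabet
  · simp only [pvQ, hin, Bool.false_and]
    simp
  · simp only [pvQ, hin, Bool.true_and, hmerge, hsp]
    simp

-- set(…) commutes with an injective map
theorem pv_ofList_map (l : List Char) :
    PySem.Set.ofList (l.map String.singleton)
      = (PySem.Set.ofList l).map String.singleton := by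
  induction l using List.reverseRecOn with
  | nil => simp [PySem.Set.ofList_nil]
  | append_singleton xs x ih =>
    rw [List.map_append, List.map_singleton,
      PySem.Set.ofList_append_singleton, PySem.Set.ofList_append_singleton, ih]
    unfold PySem.Set.add
    by_cases hm : x ∈ PySem.Set.ofList xs
    · have h1 : (PySem.Set.ofList xs).contains x = true := by
        rw [PySem.Set.contains_iff]; exact hm
      have h2 : PySem.Set.contains ((PySem.Set.ofList xs).map String.singleton) (String.singleton x) = true := by
        rw [PySem.Set.contains_iff]
        exact List.mem_map_of_mem hm
      rw [h1, h2]
      simp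
    · have h1 : (PySem.Set.ofList xs).contains x = false := by
        rw [Bool.eq_false_iff, ne_eq, PySem.Set.contains_iff]; exact hm
      have h2 : PySem.Set.contains ((PySem.Set.ofList xs).map String.singleton) (String.singleton x) = false := by
        rw [Bool.eq_false_iff, ne_eq, PySem.Set.contains_iff]
        intro hmem
        rcases List.mem_map.mp hmem with ⟨y, hy, he⟩
        exact hm (pv_sing_inj he ▸ hy)
      rw [h1, h2]
      simp

-- set(…) commutes with filtering by a predicate on the element value
theorem pv_ofList_filter (p : Char → Bool) (l : List Char) :
    PySem.Set.ofList (l.filter p) = (PySem.Set.ofList l).filter p := by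
  induction l with
  | nil => simp [PySem.Set.ofList_nil]
  | cons x xs ih =>
    rw [PySem.Set.ofList_cons]
    unfold PySem.Set.discard
    cases hx : p x
    · rw [List.filter_cons_of_neg (by simp [hx]), ih, List.filter_cons_of_neg (by simp [hx]),
        List.filter_filter]
      apply List.filter_congr
      intro a _
      by_cases hax : a = x
      · subst hax; simp [hx]
      · simp [hax]
    · rw [List.filter_cons_of_pos hx, PySem.Set.ofList_cons]
      unfold PySem.Set.discard
      rw [ih, List.filter_cons_of_pos hx, List.filter_filter, List.filter_filter]
      congr 1
      apply List.filter_congr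
      intro a _
      exact Bool.and_comm _ _

-- removing every occurrence of c shortens the list by exactly its count
theorem pv_len_sub_count (c : Char) (l : List Char) :
    ((l.length : Int) - ((l.filter (fun x => x != c)).length : Int)) = (l.count c : Int) := by
  induction l with
  | nil => simp
  | cons x xs ih =>
    by_cases hx : x = c
    · subst hx
      rw [List.filter_cons_of_neg (by simp), List.count_cons_self]
      simp only [List.length_cons]
      push_cast at ih ⊢
      omega
    · rw [List.filter_cons_of_pos (by simp [hx]), List.count_cons_of_ne hx]
      simp only [List.length_cons]
      push_cast at ih ⊢
      omega

-- characterisation of B's recursion: items = distinct kept characters with their counts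
theorem pv_go_spec (allow_spaces : Bool) (alphabet : String) (l : List Char) :
    (pvGoB allow_spaces alphabet l).items
      = (PySem.Set.ofList (l.filter (pvQ allow_spaces alphabet))).map
          (fun c => (String.singleton c, ((l.filter (pvQ allow_spaces alphabet)).count c : Int))) := by
  set q := pvQ allow_spaces alphabet with hq
  suffices h : ∀ n, ∀ l : List Char, l.length ≤ n →
      (pvGoB allow_spaces alphabet l).items
        = (PySem.Set.ofList (l.filter q)).map
            (fun c => (String.singleton c, ((l.filter q).count c : Int))) from
    h l.length l le_rfl
  intro n
  induction n with
  | zero =>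
    intro l hl
    have : l = [] := List.eq_nil_of_length_eq_zero (Nat.le_zero.mp hl)
    subst this
    simp only [pvGoB, List.filter_nil, PySem.Set.ofList_nil, List.map_nil]
    rfl
  | succ n ih =>
    intro l hl
    match l with
    | [] =>
      simp only [pvGoB, List.filter_nil, PySem.Set.ofList_nil, List.map_nil]
      rfl
    | c :: t =>
      have hrest_eq : (c :: t).filter (fun x => x != c) = t.filter (fun x => x != c) := by
        rw [List.filter_cons_of_neg (by simp)]
      have hrest_len : ((c :: t).filter (fun x => x != c)).length ≤ n := by
        rw [hrest_eq]
        exact le_trans (List.length_filter_le _ _) (Nat.lt_succ_iff.mp (by simpa using hl))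
      have hIH := ih _ hrest_len
      -- rest.filter q = (t.filter q).filter (≠ c)
      have hcomm : ((c :: t).filter (fun x => x != c)).filter q
          = (t.filter q).filter (fun x => x != c) := by
        rw [hrest_eq, List.filter_filter, List.filter_filter]
        exact List.filter_congr (fun a _ => Bool.and_comm _ _)
      rw [pvGoB]
      by_cases hqc : q c = true
      · rw [if_pos (by simpa [hq, pvQ] using hqc)]
        -- LHS: items of the update
        have hitems : ∀ (base d : PySem.Dict String Int),
            (d.keys).Nodup → (∀ k ∈ d.keys, base.contains k = false) →
            (base.update d.items).items = base.items ++ d.items := by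
          intro base d hnd hfresh
          have := PySem.Dict.items_foldl_insert_fresh (d.items) Prod.fst Prod.snd base
            (fun a ha => hfresh a.1 (List.mem_map_of_mem ha)) (by simpa [PySem.Dict.keys] using hnd)
          simpa [PySem.Dict.update] using this
        have hkeys : (pvGoB allow_spaces alphabet ((c :: t).filter (fun x => x != c))).keys
            = (PySem.Set.ofList (((c :: t).filter (fun x => x != c)).filter q)).map String.singleton := by
          simp only [PySem.Dict.keys]
          rw [hIH, List.map_map]
          rfl
        have hnd : (pvGoB allow_spaces alphabet ((c :: t).filter (fun x => x != c))).keys.Nodup := by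
          rw [hkeys]
          exact (PySem.Set.nodup_ofList _).map pv_sing_inj
        have hfresh : ∀ k ∈ (pvGoB allow_spaces alphabet ((c :: t).filter (fun x => x != c))).keys,
            (PySem.Dict.empty.insert (String.singleton c)
              ((((c :: t)).length : Int) - (((c :: t).filter (fun x => x != c)).length : Int))).contains k = false := by
          intro k hk
          rw [hkeys] at hk
          rcases List.mem_map.mp hk with ⟨x, hx, rfl⟩
          have hxmem : x ∈ ((c :: t).filter (fun x => x != c)).filter q := by
            have := (PySem.Set.mem_ofList _ _).mp hx
            exact this
          have hxne : x ≠ c := by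
            have := List.of_mem_filter (List.mem_of_mem_filter hxmem : x ∈ (c :: t).filter (fun x => x != c))
            simpa using this
          rw [PySem.Dict.contains_insert]
          have : (String.singleton x == String.singleton c) = false := by
            simp only [beq_eq_false_iff_ne, ne_eq]
            exact fun he => hxne (pv_sing_inj he)
          simp [this]
        rw [hitems _ _ hnd hfresh, hIH]
        have hbase : (PySem.Dict.empty.insert (String.singleton c)
            ((((c :: t)).length : Int) - (((c :: t).filter (fun x => x != c)).length : Int))).items
            = [(String.singleton c, (((c :: t)).length : Int) - (((c :: t).filter (fun x => x != c)).length : Int))] := by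
          rw [PySem.Dict.items_insert_of_not_contains _ _ (by simp)]
          rfl
        rw [hbase, List.singleton_append]
        -- RHS
        have hkept : (c :: t).filter q = c :: t.filter q := List.filter_cons_of_pos hqc
        rw [hkept, PySem.Set.ofList_cons]
        unfold PySem.Set.discard
        rw [List.map_cons]
        -- head: the length difference is the count of c among the kept characters
        have hhead : ((((c :: t)).length : Int) - (((c :: t).filter (fun x => x != c)).length : Int))
            = ((c :: t.filter q).count c : Int) := by
          rw [pv_len_sub_count c (c :: t)]
          have : (c :: t.filter q).count c = (c :: t).count c := by
            rw [List.count_cons_self, List.count_cons_self]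
            congr 1
            exact List.count_filter hqc
          rw [this]
        rw [hhead]
        congr 1
        -- tail
        have hfil : (PySem.Set.ofList (t.filter q)).filter (fun x => x != c)
            = (PySem.Set.ofList (t.filter q)).filter (fun y => !(y == c)) := by
          apply List.filter_congr
          intro a _
          simp [bne]
        rw [hcomm, pv_ofList_filter, ← hfil]
        apply List.map_congr_left
        intro x hx
        have hxne : x ≠ c := by simpa using (List.of_mem_filter hx)
        have h1 : ((t.filter q).filter (fun y => y != c)).count x = (t.filter q).count x :=
          List.count_filter (by simpa using hxne)
        have h2 : (c :: t.filter q).count x = (t.filter q).count x := by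
          simp [Ne.symm hxne]
        rw [h1, h2]
      · rw [if_neg (by simpa [hq, pvQ] using hqc)]
        rw [hIH, hcomm]
        have hkept : (c :: t).filter q = t.filter q := List.filter_cons_of_neg (by simpa using hqc)
        have hid : (t.filter q).filter (fun x => x != c) = t.filter q := by
          apply List.filter_eq_self.mpr
          intro a ha
          have hqa : q a = true := List.of_mem_filter ha
          have : a ≠ c := fun he => hqc (he ▸ hqa)
          simpa using this
        rw [hid, hkept]

-- a fold whose body uses only the singleton of each character is a fold over the mapped list
theorem pv_foldl_sing (g : PySem.Dict String Int → String → PySem.Dict String Int)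
    (l : List Char) (d : PySem.Dict String Int) :
    l.foldl (fun d c => g d (String.singleton c)) d = (l.map String.singleton).foldl g d := by
  induction l generalizing d with
  | nil => rfl
  | cons c l ih => simp [ih]

-- ===== VERDICT (by name: the statement is the Claim_ definition above) =====
theorem create_char_dictionary_spec : Claim_equal_create_char_dictionary := by
  intro input allow_spaces alphabet _
  unfold Spec_create_char_dictionary create_char_dictionary create_char_dictionary_alt
  rw [pv_go_spec]
  set q : Char → Bool := pvQ allow_spaces alphabet with hq
  set kept : List Char := input.toList.filter q with hkept
  have hA : (input.toList.foldl (fun d char =>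
      if PySem.Str.isIn (String.singleton char) alphabet then
        if (allow_spaces && char == ' ') || char != ' ' then
          if d.contains (String.singleton char) then
            d.insert (String.singleton char) (d.getD (String.singleton char) 0 + 1)
          else d.insert (String.singleton char) 1
        else d
      else d) PySem.Dict.empty)
      = PySem.Dict.counter (kept.map String.singleton) := by
    have hbody : (fun (d : PySem.Dict String Int) char =>
        if PySem.Str.isIn (String.singleton char) alphabet then
          if (allow_spaces && char == ' ') || char != ' ' then
            if d.contains (String.singleton char) then
              d.insert (String.singleton char) (d.getD (String.singleton char) 0 + 1)
            else d.insert (String.singleton char) 1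
          else d
        else d)
        = (fun (d : PySem.Dict String Int) c =>
          if q c then d.insert (String.singleton c) (d.getD (String.singleton c) 0 + 1) else d) := by
      funext d c
      exact pv_bodyA allow_spaces alphabet d c
    rw [hbody, ← List.foldl_filter, ← hkept]
    exact (pv_foldl_sing (fun d k => d.insert k (d.getD k 0 + 1)) kept PySem.Dict.empty).trans
      (PySem.Dict.foldl_insert_getD_add_one_eq_counter _)
  rw [hA, PySem.Dict.items_counter, pv_ofList_map, List.map_map]
  apply List.map_congr_left
  intro c _
  simp only [Function.comp]
  rw [List.count_map_of_injective _ _ pv_sing_inj]
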